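-- pv_equiv track=rewrite | github.com/StevenPvr/Praedixa | app-api/scripts/medallion_pipeline.py | split_gold_features_and_quality_metadata
-- ===== SOURCE A (Python) =====
-- from typing import Any
--
-- _LEGACY_RUNTIME_COLUMN_PREFIX = "mock_"
--
-- def split_gold_features_and_quality_metadata(
--     rows: list[dict[str, Any]],
-- ) -> tuple[list[dict[str, Any]], list[str]]:
--     legacy_runtime_columns = sorted(
--         {
--             key
--             for row in rows
--             for key in row
--             if key.startswith(_LEGACY_RUNTIME_COLUMN_PREFIX)
--         }
--     )
--     if legacy_runtime_columns:
--         raise RuntimeError(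
--             "Gold features must use canonical runtime column names; "
--             f"found: {', '.join(legacy_runtime_columns)}"
--         )
--
--     key_columns = {"client_slug", "site_code", "site_name", "date"}
--     quality_suffixes = ("__imputation_method", "__imputed", "__outlier_clamped")
--
--     feature_rows: list[dict[str, Any]] = []
--     removed_columns: set[str] = set()
--
--     for row in rows:
--         clean_row: dict[str, Any] = {}
--         for key, value in row.items():
--             if key in key_columns:
--                 clean_row[key] = value
--                 continue
--             if key.endswith(quality_suffixes):
--                 removed_columns.add(key)
--                 continue
--             clean_row[key] = value
--         feature_rows.append(clean_row)
--
--     return feature_rows, sorted(removed_columns)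
-- ===== SOURCE B (Python) =====
-- _LEGACY_RUNTIME_COLUMN_PREFIX = "mock_"
--
-- def split_gold_features_and_quality_metadata(rows):
--     legacy_runtime_columns = sorted(
--         {
--             key
--             for row in rows
--             for key in row
--             if key.startswith(_LEGACY_RUNTIME_COLUMN_PREFIX)
--         }
--     )
--     if legacy_runtime_columns:
--         raise RuntimeError(
--             "Gold features must use canonical runtime column names; "
--             f"found: {', '.join(legacy_runtime_columns)}"
--         )
--
--     quality_suffixes = ("__imputation_method", "__imputed", "__outlier_clamped")
--     removed = {
--         key for row in rows for key in row if key.endswith(quality_suffixes)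
--     }
--     feature_rows = [
--         {k: v for k, v in row.items() if k not in removed} for row in rows
--     ]
--     return feature_rows, sorted(removed)
-- ===== Notes on version B (the rewrite author's own statement) =====
-- stated objective: simpler
-- what changed: Replaces A's per-cell three-branch classification (with the key_columns whitelist and a removed-set mutated inside the row loop) by an index-first design: one comprehension collects every quality-suffixed column into a removed set, then each row is rebuilt by a dict comprehension keeping keys not in that set; the key_columns whitelist disappears since no key column ends with a quality suffix.
import Mathlib
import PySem

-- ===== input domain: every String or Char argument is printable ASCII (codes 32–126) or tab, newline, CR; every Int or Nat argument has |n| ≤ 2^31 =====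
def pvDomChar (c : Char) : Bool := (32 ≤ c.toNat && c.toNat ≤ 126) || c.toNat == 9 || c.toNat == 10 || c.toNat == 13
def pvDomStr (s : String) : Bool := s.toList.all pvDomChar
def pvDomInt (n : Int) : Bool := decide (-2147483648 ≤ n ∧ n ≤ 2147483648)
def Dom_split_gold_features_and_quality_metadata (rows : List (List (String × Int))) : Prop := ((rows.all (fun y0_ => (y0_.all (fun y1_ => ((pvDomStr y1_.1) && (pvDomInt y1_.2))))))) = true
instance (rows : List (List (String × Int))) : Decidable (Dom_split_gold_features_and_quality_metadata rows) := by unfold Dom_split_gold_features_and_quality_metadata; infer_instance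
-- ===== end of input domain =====

-- B drops the redundant key_columns whitelist and the in-loop removed-set mutation: it indexes the
-- quality-suffixed columns first, then filters each row by membership in that set (objective: simpler).


-- shared by both ports (identical Python in A and B): key.endswith(quality_suffixes)
def pvQSuffix (k : String) : Bool :=
  PySem.Str.endswith k "__imputation_method" || PySem.Str.endswith k "__imputed" ||
    PySem.Str.endswith k "__outlier_clamped"

-- shared by both ports (identical Python in A and B): sorted({key for row in rows for key in row if key.startswith("mock_")})
def pvLegacy (rows : List (List (String × Int))) : List String :=
  PySem.List.sorted
    (PySem.Set.ofList
      (rows.flatMap (fun row => (row.map Prod.fst).filter (fun k => PySem.Str.startswith k "mock_"))))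
    (fun x => x) false

-- ===== PORT A =====
def pvKeyCols : PySem.Set String :=
  PySem.Set.ofList ["client_slug", "site_code", "site_name", "date"]

-- one iteration of A's inner 'for key, value in row.items()' loop (state: clean_row, removed_columns)
def pvStepCell (st : PySem.Dict String Int × PySem.Set String) (kv : String × Int) :
    PySem.Dict String Int × PySem.Set String :=
  if PySem.Set.contains pvKeyCols kv.1 then (st.1.insert kv.1 kv.2, st.2)
  else if pvQSuffix kv.1 then (st.1, PySem.Set.add st.2 kv.1)
  else (st.1.insert kv.1 kv.2, st.2)

-- one iteration of A's outer 'for row in rows' loop (state: feature_rows, removed_columns)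
def pvStepRow (acc : List (List (String × Int)) × PySem.Set String) (row : List (String × Int)) :
    List (List (String × Int)) × PySem.Set String :=
  let inner := row.foldl pvStepCell (PySem.Dict.empty, acc.2)
  (acc.1 ++ [inner.1.items], inner.2)

def split_gold_features_and_quality_metadata (rows : List (List (String × Int))) :
    (List (List (String × Int))) × List String :=
  let legacy := pvLegacy rows
  if legacy ≠ [] then ([], legacy)  -- Python raises RuntimeError here; excluded by Pre_
  else
    let st := rows.foldl pvStepRow ([], PySem.Set.empty)
    (st.1, PySem.List.sorted st.2 (fun x => x) false)

-- ===== PORT B =====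
-- {key for row in rows for key in row if key.endswith(quality_suffixes)}
def pvRemoved (rows : List (List (String × Int))) : PySem.Set String :=
  PySem.Set.ofList (rows.flatMap (fun row => (row.map Prod.fst).filter pvQSuffix))

-- {k: v for k, v in row.items() if k not in removed}
def pvCleanRow (R : PySem.Set String) (row : List (String × Int)) : List (String × Int) :=
  (row.foldl
    (fun (d : PySem.Dict String Int) kv =>
      if PySem.Set.contains R kv.1 then d else d.insert kv.1 kv.2)
    PySem.Dict.empty).items

def split_gold_features_and_quality_metadata_alt (rows : List (List (String × Int))) :
    (List (List (String × Int))) × List String :=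
  let legacy := pvLegacy rows
  if legacy ≠ [] then ([], [])  -- Python raises RuntimeError here; excluded by Pre_
  else
    let removed := pvRemoved rows
    (rows.map (pvCleanRow removed), PySem.List.sorted removed (fun x => x) false)

-- ===== PRECONDITION & SPEC =====
-- Pre_ excludes exactly the inputs where some key starts with "mock_": there A (and B) raise RuntimeError.
def Pre_split_gold_features_and_quality_metadata (rows : List (List (String × Int))) : Prop :=
  ∀ row ∈ rows, ∀ p ∈ row, PySem.Str.startswith p.1 "mock_" = false
instance (rows : List (List (String × Int))) : Decidable (Pre_split_gold_features_and_quality_metadata rows) := by unfold Pre_split_gold_features_and_quality_metadata; infer_instance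

def pvWitness_split_gold_features_and_quality_metadata : (List (List (String × Int))) :=
  [[("date", 1), ("a__imputed", 2), ("b", 3)], [("b", 4)]]

def Spec_split_gold_features_and_quality_metadata (rows : List (List (String × Int))) (out : (List (List (String × Int))) × List String) : Prop := out = split_gold_features_and_quality_metadata_alt rows
instance (rows : List (List (String × Int))) (out : (List (List (String × Int))) × List String) : Decidable (Spec_split_gold_features_and_quality_metadata rows out) := by unfold Spec_split_gold_features_and_quality_metadata; infer_instance

-- ===== CLAIM (what is proved, stated in full; the proofs are below) =====
def Claim_equal_split_gold_features_and_quality_metadata : Prop := ∀ (rows : List (List (String × Int))), Dom_split_gold_features_and_quality_metadata rows → Pre_split_gold_features_and_quality_metadata rows → Spec_split_gold_features_and_quality_metadata rows (split_gold_features_and_quality_metadata rows)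

-- ===== LEMMAS AND PROOFS =====

-- no key column ends with a quality suffix
lemma pv_keycol_not_suffix (k : String) (h : PySem.Set.contains pvKeyCols k = true) :
    pvQSuffix k = false := by
  rw [PySem.Set.contains_iff] at h
  simp only [pvKeyCols, PySem.Set.mem_ofList, List.mem_cons, List.not_mem_nil, or_false] at h
  rcases h with h | h | h | h <;> subst h <;> decide

-- the dict part of A's inner loop ignores the removed accumulator and equals B's membership filter
lemma pv_inner_dict (R : PySem.Set String) (row : List (String × Int)) :
    ∀ (d : PySem.Dict String Int) (rem : PySem.Set String),
      (∀ p ∈ row, PySem.Set.contains R p.1 = pvQSuffix p.1) →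
      (row.foldl pvStepCell (d, rem)).1
        = row.foldl
            (fun (d : PySem.Dict String Int) kv =>
              if PySem.Set.contains R kv.1 then d else d.insert kv.1 kv.2) d := by
  induction row with
  | nil => intro d rem _; rfl
  | cons p t ih =>
    intro d rem hR
    have hp := hR p (List.mem_cons_self ..)
    have ht : ∀ q ∈ t, PySem.Set.contains R q.1 = pvQSuffix q.1 :=
      fun q hq => hR q (List.mem_cons_of_mem _ hq)
    simp only [List.foldl_cons, pvStepCell]
    by_cases hk : PySem.Set.contains pvKeyCols p.1 = true
    · have hs := pv_keycol_not_suffix p.1 hk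
      rw [hk, if_pos rfl, hp, hs, if_neg (by simp)]
      exact ih _ _ ht
    · rw [if_neg hk, hp]
      by_cases hq : pvQSuffix p.1 = true
      · rw [hq, if_pos rfl, if_pos rfl]; exact ih _ _ ht
      · rw [Bool.not_eq_true] at hq
        rw [hq, if_neg (by simp), if_neg (by simp)]; exact ih _ _ ht

-- the removed part of A's inner loop is a fold of Set.add over the row's quality-suffixed keys
lemma pv_inner_rem (row : List (String × Int)) :
    ∀ (d : PySem.Dict String Int) (rem : PySem.Set String),
      (row.foldl pvStepCell (d, rem)).2
        = ((row.map Prod.fst).filter pvQSuffix).foldl PySem.Set.add rem := by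
  induction row with
  | nil => intro d rem; rfl
  | cons p t ih =>
    intro d rem
    simp only [List.foldl_cons, pvStepCell, List.map_cons, List.filter_cons]
    by_cases hk : PySem.Set.contains pvKeyCols p.1 = true
    · have hs := pv_keycol_not_suffix p.1 hk
      rw [hk, if_pos rfl, hs]
      simp only [Bool.false_eq_true, if_false]
      exact ih _ _
    · rw [if_neg hk]
      by_cases hq : pvQSuffix p.1 = true
      · rw [hq, if_pos rfl]
        simp only [if_true, List.foldl_cons]
        exact ih _ _
      · rw [Bool.not_eq_true] at hq
        rw [hq, if_neg (by simp)]
        simp only [Bool.false_eq_true, if_false]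
        exact ih _ _

-- A's outer loop, given any set R agreeing with pvQSuffix on all keys of the remaining rows
lemma pv_main (R : PySem.Set String) :
    ∀ (rs : List (List (String × Int))) (feats : List (List (String × Int))) (rem : PySem.Set String),
      (∀ row ∈ rs, ∀ p ∈ row, PySem.Set.contains R p.1 = pvQSuffix p.1) →
      rs.foldl pvStepRow (feats, rem)
        = (feats ++ rs.map (pvCleanRow R),
           (rs.flatMap (fun row => (row.map Prod.fst).filter pvQSuffix)).foldl PySem.Set.add rem) := by
  intro rs
  induction rs with
  | nil => intro feats rem _; simp
  | cons row t ih =>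
    intro feats rem hR
    have hrow := hR row (List.mem_cons_self ..)
    have ht : ∀ r ∈ t, ∀ p ∈ r, PySem.Set.contains R p.1 = pvQSuffix p.1 :=
      fun r hr => hR r (List.mem_cons_of_mem _ hr)
    simp only [List.foldl_cons, List.map_cons, List.flatMap_cons]
    rw [pvStepRow, ih _ _ ht]
    rw [pv_inner_dict R row _ _ hrow, pv_inner_rem row]
    simp [pvCleanRow, List.foldl_append]

-- pvRemoved agrees with pvQSuffix on every key occurring in rows
lemma pv_removed_agrees (rows : List (List (String × Int))) :
    ∀ row ∈ rows, ∀ p ∈ row, PySem.Set.contains (pvRemoved rows) p.1 = pvQSuffix p.1 := by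
  intro row hrow p hp
  by_cases hq : pvQSuffix p.1 = true
  · rw [hq]
    rw [PySem.Set.contains_iff]
    simp only [pvRemoved, PySem.Set.mem_ofList, List.mem_flatMap]
    exact ⟨row, hrow, List.mem_filter.mpr ⟨List.mem_map_of_mem hp, hq⟩⟩
  · rw [Bool.not_eq_true] at hq
    rw [hq, Bool.eq_false_iff, ne_eq, PySem.Set.contains_iff]
    simp only [pvRemoved, PySem.Set.mem_ofList, List.mem_flatMap]
    rintro ⟨r, -, hmem⟩
    have := (List.mem_filter.mp hmem).2
    rw [hq] at this
    exact absurd this (by simp)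

-- under Pre_, no key starts with "mock_", so the legacy check passes
lemma pv_legacy_nil (rows : List (List (String × Int)))
    (h : Pre_split_gold_features_and_quality_metadata rows) : pvLegacy rows = [] := by
  have hflat : rows.flatMap
      (fun row => (row.map Prod.fst).filter (fun k => PySem.Str.startswith k "mock_")) = [] := by
    rw [List.flatMap_eq_nil_iff]
    intro row hrow
    rw [List.filter_eq_nil_iff]
    intro k hk
    obtain ⟨p, hp, rfl⟩ := List.mem_map.mp hk
    have h' := h row hrow p hp
    simpa using h'
  rw [pvLegacy, hflat]
  rfl

-- ===== VERDICT (by name: the statement is the Claim_ definition above) =====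
theorem split_gold_features_and_quality_metadata_spec : Claim_equal_split_gold_features_and_quality_metadata := by
  intro rows _ hpre
  unfold Spec_split_gold_features_and_quality_metadata
  unfold split_gold_features_and_quality_metadata split_gold_features_and_quality_metadata_alt
  rw [pv_legacy_nil rows hpre]
  simp only [ne_eq, not_true_eq_false, if_false]
  rw [pv_main (pvRemoved rows) rows [] PySem.Set.empty (pv_removed_agrees rows)]
  simp [pvRemoved, PySem.Set.ofList_eq_foldl]
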